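-- pv_equiv track=rewrite | github.com/D-Alegria/algorithm_patterns | twilio/gem_stones.py | find_unique_stone
-- ===== SOURCE A (Python) =====
-- from collections import Counter
--
-- def find_unique_stone(gems):
--     if len(gems) == 1:
--         return len(gems[0])
--
--     current = Counter(gems[0])
--
--     for k, v in current.items():
--         current[k] *= len(gems)
--     for row in range(1, len(gems)):
--         next_ = Counter(gems[row])
--         remove = []
--         for k, v in current.items():
--             if k in next_ and current[k] - next_[k] >= 0:
--                 current[k] -= next_[k]
--             else:
--                 remove.append(k)
--
--         for r in remove:
--             del current[r]
--
--     return sum(current.values())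
-- ===== SOURCE B (Python) =====
-- from collections import Counter
--
-- def find_unique_stone(gems):
--     n = len(gems)
--     if n == 1:
--         return len(gems[0])
--     common = set(gems[0])
--     for row in gems[1:]:
--         common &= set(row)
--     rest = Counter()
--     for row in gems[1:]:
--         rest.update(row)
--     c0 = Counter(gems[0])
--     return sum(c0[k] * n - rest[k]
--                for k in c0
--                if k in common and c0[k] * n - rest[k] >= 0)
-- ===== Notes on version B (the rewrite author's own statement) =====
-- stated objective: faster
-- what changed: Replaces A's sequential per-row simulation (a shared mutable dict scaled then decremented row by row with deferred deletes and a prefix survival guard) by a closed-form aggregate: one set intersection gives the keys present in every row, one combined Counter over the remaining rows gives the total to subtract, and a key survives iff c0*n - total >= 0 (equivalent because per-row counts are nonnegative, so the prefix guard equals the total guard); this removes A's K dict probes per row.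
import Mathlib
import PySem

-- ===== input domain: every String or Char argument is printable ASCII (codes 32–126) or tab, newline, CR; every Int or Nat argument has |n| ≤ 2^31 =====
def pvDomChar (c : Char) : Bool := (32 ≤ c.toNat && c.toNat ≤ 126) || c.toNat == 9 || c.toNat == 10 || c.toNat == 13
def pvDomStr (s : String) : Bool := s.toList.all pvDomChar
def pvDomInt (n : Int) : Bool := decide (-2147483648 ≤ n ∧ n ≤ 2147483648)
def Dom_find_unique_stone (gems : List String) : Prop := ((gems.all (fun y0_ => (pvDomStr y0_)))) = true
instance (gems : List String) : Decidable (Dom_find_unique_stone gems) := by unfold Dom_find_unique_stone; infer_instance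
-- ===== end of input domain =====

-- B replaces A's row-by-row simulation (mutable dict, deferred deletes, prefix guard) by a
-- closed-form aggregate: set intersection for presence in every row plus one combined counter
-- of all remaining rows; equivalent since counts are nonnegative. Same return value.

-- ===== PORT A =====
def find_unique_stone (gems : List String) : Int :=
  if gems.length == 1 then
    PySem.Str.len (PySem.List.pyGetD gems 0 "")
  else
    (((PySem.List.pyRange 1 (PySem.List.len gems) 1).foldl
      (fun current row =>
        let next_ := PySem.Dict.counter (PySem.List.pyGetD gems row "").toList
        let st := current.items.foldl
          (fun (st : PySem.Dict Char Int × List Char) p =>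
            if next_.contains p.1 && decide (st.1.getD p.1 0 - next_.getD p.1 0 ≥ 0) then
              (st.1.modify p.1 0 (· - next_.getD p.1 0), st.2)
            else
              (st.1, st.2 ++ [p.1]))
          (current, ([] : List Char))
        st.2.foldl (fun d r => d.erase r) st.1)
      ((PySem.Dict.counter (PySem.List.pyGetD gems 0 "").toList).items.foldl
        (fun d p => d.modify p.1 0 (· * PySem.List.len gems))
        (PySem.Dict.counter (PySem.List.pyGetD gems 0 "").toList))).values).sum

-- ===== PORT B =====
def find_unique_stone_alt (gems : List String) : Int :=
  if (PySem.List.len gems) == 1 then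
    PySem.Str.len (PySem.List.pyGetD gems 0 "")
  else
    let n := PySem.List.len gems
    let common := (PySem.List.slice gems (some 1)).foldl
      (fun s row => PySem.Set.inter s (PySem.Set.ofList row.toList))
      (PySem.Set.ofList (PySem.List.pyGetD gems 0 "").toList)
    let rest := (PySem.List.slice gems (some 1)).foldl
      (fun d row => row.toList.foldl (fun d c => d.modify c 0 (· + 1)) d)
      (PySem.Dict.empty : PySem.Dict Char Int)
    let c0 := PySem.Dict.counter (PySem.List.pyGetD gems 0 "").toList
    c0.keys.foldl
      (fun total k =>
        if PySem.Set.contains common k && decide (c0.getD k 0 * n - rest.getD k 0 ≥ 0) then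
          total + (c0.getD k 0 * n - rest.getD k 0)
        else total) 0

-- ===== PRECONDITION & SPEC =====
-- Pre_ excludes only the empty list, on which the Python A raises IndexError (gems[0]).
def Pre_find_unique_stone (gems : List String) : Prop := gems ≠ []
instance (gems : List String) : Decidable (Pre_find_unique_stone gems) := by unfold Pre_find_unique_stone; infer_instance
def pvWitness_find_unique_stone : List String := (["aab", "ab"])
def Spec_find_unique_stone (gems : List String) (out : Int) : Prop := out = find_unique_stone_alt gems
instance (gems : List String) (out : Int) : Decidable (Spec_find_unique_stone gems out) := by unfold Spec_find_unique_stone; infer_instance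

-- ===== CLAIM (what is proved, stated in full; the proofs are below) =====
def Claim_equal_find_unique_stone : Prop := ∀ (gems : List String), Dom_find_unique_stone gems → Pre_find_unique_stone gems → Spec_find_unique_stone gems (find_unique_stone gems)

-- ===== LEMMAS AND PROOFS =====

-- A's per-row survival of a single key, as a proof-side characterisation
def goKey (k : Char) : Int → List (PySem.Dict Char Int) → Option Int
  | val, [] => some val
  | val, cr :: rest =>
    if cr.contains k && decide (val - cr.getD k 0 ≥ 0) then
      goKey k (val - cr.getD k 0) rest
    else none

def stepP (nxt : PySem.Dict Char Int) (p : Char × Int) : Option (Char × Int) :=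
  if nxt.contains p.1 && decide (p.2 - nxt.getD p.1 0 ≥ 0) then
    some (p.1, p.2 - nxt.getD p.1 0)
  else none

theorem find?_none_of_not_mem (P : List (Char × Int)) (k : Char) (h : k ∉ P.map Prod.fst) :
    P.find? (fun q => q.1 == k) = none := by
  apply List.find?_eq_none.mpr
  intro q hq
  simp only [beq_eq_false_iff_ne, ne_eq, Bool.not_eq_true]
  intro he
  exact h (he ▸ List.mem_map_of_mem hq)

theorem map_id_of_not_mem (S : List (Char × Int)) (k : Char) (v : Char × Int)
    (h : k ∉ S.map Prod.fst) :
    S.map (fun q => if (q.1 == k) = true then v else q) = S := by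
  have : ∀ q ∈ S, (if (q.1 == k) = true then v else q) = q := by
    intro q hq
    have : (q.1 == k) = false := by
      simp only [beq_eq_false_iff_ne, ne_eq]
      intro he; exact h (he ▸ List.mem_map_of_mem hq)
    simp [this]
  rw [List.map_congr_left this]; simp

theorem getD_mid (P : List (Char × Int)) (p : Char × Int) (S : List (Char × Int))
    (h : p.1 ∉ P.map Prod.fst) :
    (PySem.Dict.mk (P ++ p :: S)).getD p.1 0 = p.2 := by
  simp only [PySem.Dict.getD, PySem.Dict.get?, List.find?_append,
    find?_none_of_not_mem P p.1 h, List.find?_cons, BEq.rfl]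
  rfl

theorem contains_mid (P : List (Char × Int)) (p : Char × Int) (S : List (Char × Int)) :
    (PySem.Dict.mk (P ++ p :: S)).contains p.1 = true := by
  simp [PySem.Dict.contains, List.any_append]

theorem modify_mid (P : List (Char × Int)) (p : Char × Int) (S : List (Char × Int))
    (hP : p.1 ∉ P.map Prod.fst) (hS : p.1 ∉ S.map Prod.fst) (f : Int → Int) :
    (PySem.Dict.mk (P ++ p :: S)).modify p.1 0 f = PySem.Dict.mk (P ++ (p.1, f p.2) :: S) := by
  rw [PySem.Dict.modify, getD_mid P p S hP, PySem.Dict.insert, if_pos (contains_mid P p S)]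
  congr 1
  simp only [List.map_append, List.map_cons, BEq.rfl, if_pos,
    map_id_of_not_mem P p.1 _ hP, map_id_of_not_mem S p.1 _ hS]

theorem erase_loop : ∀ (rem : List Char) (d : PySem.Dict Char Int),
    (rem.foldl (fun d r => d.erase r) d).items
      = d.items.filter (fun p => !rem.contains p.1) := by
  intro rem
  induction rem with
  | nil => intro d; simp
  | cons r rem ih =>
    intro d
    rw [List.foldl_cons, ih]
    simp only [PySem.Dict.erase, List.filter_filter]
    apply List.filter_congr
    intro p _
    simp only [List.contains_cons, Bool.not_or, Bool.and_comm]

theorem nodup_parts {P S : List (Char × Int)} {p : Char × Int}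
    (h : ((P ++ p :: S).map Prod.fst).Nodup) :
    p.1 ∉ P.map Prod.fst ∧ p.1 ∉ S.map Prod.fst := by
  rw [List.map_append, List.map_cons, List.nodup_middle, List.nodup_cons] at h
  have := h.1
  simp only [List.mem_append] at this
  exact ⟨fun hm => this (Or.inl hm), fun hm => this (Or.inr hm)⟩

theorem scale_loop (N : Int) : ∀ (S P : List (Char × Int)),
    ((P ++ S).map Prod.fst).Nodup →
    (S.foldl (fun d p => d.modify p.1 0 (· * N)) (PySem.Dict.mk (P ++ S))).items
      = P ++ S.map (fun p => (p.1, p.2 * N)) := by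
  intro S
  induction S with
  | nil => intro P _; simp
  | cons p S ih =>
    intro P h
    obtain ⟨hP, hS⟩ := nodup_parts h
    rw [List.foldl_cons, modify_mid P p S hP hS]
    have h' : (((P ++ [(p.1, p.2 * N)]) ++ S).map Prod.fst).Nodup := by simpa using h
    have := ih (P ++ [(p.1, p.2 * N)]) h'
    simpa using this

theorem inner_loop (nxt : PySem.Dict Char Int) : ∀ (S P : List (Char × Int)) (rem : List Char),
    ((P ++ S).map Prod.fst).Nodup →
    (S.foldl
      (fun (st : PySem.Dict Char Int × List Char) p =>
        if nxt.contains p.1 && decide (st.1.getD p.1 0 - nxt.getD p.1 0 ≥ 0) then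
          (st.1.modify p.1 0 (· - nxt.getD p.1 0), st.2)
        else
          (st.1, st.2 ++ [p.1]))
      (PySem.Dict.mk (P ++ S), rem)).1.items
        = P ++ S.map (fun p => if nxt.contains p.1 && decide (p.2 - nxt.getD p.1 0 ≥ 0)
            then (p.1, p.2 - nxt.getD p.1 0) else p)
    ∧ (S.foldl
      (fun (st : PySem.Dict Char Int × List Char) p =>
        if nxt.contains p.1 && decide (st.1.getD p.1 0 - nxt.getD p.1 0 ≥ 0) then
          (st.1.modify p.1 0 (· - nxt.getD p.1 0), st.2)
        else
          (st.1, st.2 ++ [p.1]))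
      (PySem.Dict.mk (P ++ S), rem)).2
        = rem ++ (S.filter (fun p => !(nxt.contains p.1 && decide (p.2 - nxt.getD p.1 0 ≥ 0)))).map Prod.fst := by
  intro S
  induction S with
  | nil => intro P rem _; simp
  | cons p S ih =>
    intro P rem h
    obtain ⟨hP, hS⟩ := nodup_parts h
    rw [List.foldl_cons]
    have hg : (PySem.Dict.mk (P ++ p :: S)).getD p.1 0 = p.2 := getD_mid P p S hP
    simp only [hg]
    by_cases hc : (nxt.contains p.1 && decide (p.2 - nxt.getD p.1 0 ≥ 0)) = true
    · rw [if_pos hc, modify_mid P p S hP hS]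
      have h' : (((P ++ [(p.1, p.2 - nxt.getD p.1 0)]) ++ S).map Prod.fst).Nodup := by simpa using h
      have e := ih (P ++ [(p.1, p.2 - nxt.getD p.1 0)]) rem h'
      have hnc : (!(nxt.contains p.1 && decide (p.2 - nxt.getD p.1 0 ≥ 0))) = false := by simp only [hc, Bool.not_true]
      refine ⟨?_, ?_⟩
      · rw [List.map_cons, if_pos hc]
        have := e.1; simpa using this
      · rw [List.filter_cons, hnc]
        have := e.2; simpa using this
    · rw [if_neg hc]
      have hmk : PySem.Dict.mk (P ++ p :: S) = PySem.Dict.mk ((P ++ [p]) ++ S) := by simp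
      rw [hmk]
      have h' : (((P ++ [p]) ++ S).map Prod.fst).Nodup := by simpa using h
      have e := ih (P ++ [p]) (rem ++ [p.1]) h'
      have hnc : (!(nxt.contains p.1 && decide (p.2 - nxt.getD p.1 0 ≥ 0))) = true := by
        cases hb : (nxt.contains p.1 && decide (p.2 - nxt.getD p.1 0 ≥ 0)) with
        | true => exact absurd hb hc
        | false => simp
      refine ⟨?_, ?_⟩
      · rw [List.map_cons, if_neg hc]
        have := e.1; simpa using this
      · rw [List.filter_cons, hnc]
        have := e.2; simpa using this

theorem filterMap_step_eq (nxt : PySem.Dict Char Int) (S : List (Char × Int)) :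
    S.filterMap (stepP nxt)
      = (S.filter (fun p => nxt.contains p.1 && decide (p.2 - nxt.getD p.1 0 ≥ 0))).map
          (fun p => (p.1, p.2 - nxt.getD p.1 0)) := by
  induction S with
  | nil => rfl
  | cons p S ih =>
    rw [List.filter_cons]
    by_cases hc : (nxt.contains p.1 && decide (p.2 - nxt.getD p.1 0 ≥ 0)) = true
    · have h1 : stepP nxt p = some (p.1, p.2 - nxt.getD p.1 0) := by rw [stepP, if_pos hc]
      rw [List.filterMap_cons_some h1, hc, if_pos rfl, List.map_cons, ih]
    · have h1 : stepP nxt p = none := by rw [stepP, if_neg hc]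
      rw [List.filterMap_cons_none h1, Bool.eq_false_iff.mpr hc, if_neg Bool.false_ne_true, ih]

theorem keys_filterMap_step (nxt : PySem.Dict Char Int) (S : List (Char × Int)) :
    ((S.filterMap (stepP nxt)).map Prod.fst).Sublist (S.map Prod.fst) := by
  rw [filterMap_step_eq, List.map_map]
  have h1 : (List.filter (fun p => nxt.contains p.1 && decide (p.2 - nxt.getD p.1 0 ≥ 0)) S).map
      (Prod.fst ∘ fun p => (p.1, p.2 - nxt.getD p.1 0))
      = (List.filter (fun p => nxt.contains p.1 && decide (p.2 - nxt.getD p.1 0 ≥ 0)) S).map Prod.fst := by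
    apply List.map_congr_left; intro q _; rfl
  rw [h1]
  exact List.Sublist.map Prod.fst (List.filter_sublist)

theorem failkeys_sub (nxt : PySem.Dict Char Int) (S : List (Char × Int)) :
    ∀ k ∈ (S.filter (fun p => !(nxt.contains p.1 && decide (p.2 - nxt.getD p.1 0 ≥ 0)))).map Prod.fst,
      k ∈ S.map Prod.fst := by
  intro k hk
  obtain ⟨q, hq, rfl⟩ := List.mem_map.mp hk
  exact List.mem_map_of_mem (List.mem_of_mem_filter hq)

theorem filter_map_fail (nxt : PySem.Dict Char Int) : ∀ (S : List (Char × Int)),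
    (S.map Prod.fst).Nodup →
    ((S.map (fun p => if nxt.contains p.1 && decide (p.2 - nxt.getD p.1 0 ≥ 0)
        then (p.1, p.2 - nxt.getD p.1 0) else p)).filter
      (fun p => !((S.filter (fun q => !(nxt.contains q.1 && decide (q.2 - nxt.getD q.1 0 ≥ 0)))).map Prod.fst).contains p.1))
      = S.filterMap (stepP nxt) := by
  intro S
  induction S with
  | nil => intro _; rfl
  | cons p S ih =>
    intro h
    rw [List.map_cons] at h
    have hp1 : p.1 ∉ S.map Prod.fst := (List.nodup_cons.mp h).1
    have hS : (S.map Prod.fst).Nodup := (List.nodup_cons.mp h).2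
    by_cases hc : (nxt.contains p.1 && decide (p.2 - nxt.getD p.1 0 ≥ 0)) = true
    · have hnotin : p.1 ∉ (S.filter (fun q => !(nxt.contains q.1 && decide (q.2 - nxt.getD q.1 0 ≥ 0)))).map Prod.fst :=
        fun hm => hp1 (failkeys_sub nxt S _ hm)
      have h1 : stepP nxt p = some (p.1, p.2 - nxt.getD p.1 0) := by rw [stepP, if_pos hc]
      have hfk : (List.filter (fun q => !(nxt.contains q.1 && decide (q.2 - nxt.getD q.1 0 ≥ 0))) (p :: S))
          = List.filter (fun q => !(nxt.contains q.1 && decide (q.2 - nxt.getD q.1 0 ≥ 0))) S := by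
        have hncp : (!(nxt.contains p.1 && decide (p.2 - nxt.getD p.1 0 ≥ 0))) = false := by rw [hc]; rfl
        rw [List.filter_cons, hncp, if_neg Bool.false_ne_true]
      rw [List.map_cons, List.filterMap_cons_some h1, if_pos hc, hfk, List.filter_cons]
      have hhead : (!((List.map Prod.fst (List.filter (fun q => !(nxt.contains q.1 && decide (q.2 - nxt.getD q.1 0 ≥ 0))) S)).contains (p.1, p.2 - nxt.getD p.1 0).1)) = true := by
        simpa using hnotin
      rw [hhead, if_pos rfl]
      exact congrArg (List.cons _) (ih hS)
    · have hcf : (nxt.contains p.1 && decide (p.2 - nxt.getD p.1 0 ≥ 0)) = false :=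
        Bool.eq_false_iff.mpr hc
      have h1 : stepP nxt p = none := by rw [stepP, if_neg hc]
      have hfk : (List.filter (fun q => !(nxt.contains q.1 && decide (q.2 - nxt.getD q.1 0 ≥ 0))) (p :: S))
          = p :: List.filter (fun q => !(nxt.contains q.1 && decide (q.2 - nxt.getD q.1 0 ≥ 0))) S := by
        rw [List.filter_cons, hcf]
        rfl
      have htail : ∀ q ∈ S.map (fun r => if (nxt.contains r.1 && decide (r.2 - nxt.getD r.1 0 ≥ 0)) = true then (r.1, r.2 - nxt.getD r.1 0) else r),
          (!((List.map Prod.fst (p :: List.filter (fun r => !(nxt.contains r.1 && decide (r.2 - nxt.getD r.1 0 ≥ 0))) S)).contains q.1))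
            = (!((List.map Prod.fst (List.filter (fun r => !(nxt.contains r.1 && decide (r.2 - nxt.getD r.1 0 ≥ 0))) S)).contains q.1)) := by
        intro q hq
        obtain ⟨o, ho, rfl⟩ := List.mem_map.mp hq
        have hq1 : (if (nxt.contains o.1 && decide (o.2 - nxt.getD o.1 0 ≥ 0)) = true then (o.1, o.2 - nxt.getD o.1 0) else o).1 = o.1 := by
          split <;> rfl
        have hne : p.1 ≠ o.1 := fun he => hp1 (he ▸ List.mem_map_of_mem ho)
        have hb1 : (p.1 == o.1) = false := beq_eq_false_iff_ne.mpr hne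
        have hb2 : (o.1 == p.1) = false := beq_eq_false_iff_ne.mpr (Ne.symm hne)
        simp only [hq1, List.map_cons, List.contains_cons, hb2, Bool.false_or]
      rw [List.map_cons, List.filterMap_cons_none h1, if_neg hc, hfk, List.filter_cons]
      have hhead : (!((List.map Prod.fst (p :: List.filter (fun q => !(nxt.contains q.1 && decide (q.2 - nxt.getD q.1 0 ≥ 0))) S)).contains p.1)) = false := by
        simp
      rw [hhead, if_neg Bool.false_ne_true, List.filter_congr htail]
      exact ih hS

def rowFun (current nxt : PySem.Dict Char Int) : PySem.Dict Char Int :=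
  let st := current.items.foldl
    (fun (st : PySem.Dict Char Int × List Char) p =>
      if nxt.contains p.1 && decide (st.1.getD p.1 0 - nxt.getD p.1 0 ≥ 0) then
        (st.1.modify p.1 0 (· - nxt.getD p.1 0), st.2)
      else
        (st.1, st.2 ++ [p.1]))
    (current, ([] : List Char))
  st.2.foldl (fun d r => d.erase r) st.1

theorem row_step (nxt : PySem.Dict Char Int) (L : List (Char × Int))
    (h : (L.map Prod.fst).Nodup) :
    (let st := (PySem.Dict.mk L).items.foldl
        (fun (st : PySem.Dict Char Int × List Char) p =>
          if nxt.contains p.1 && decide (st.1.getD p.1 0 - nxt.getD p.1 0 ≥ 0) then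
            (st.1.modify p.1 0 (· - nxt.getD p.1 0), st.2)
          else
            (st.1, st.2 ++ [p.1]))
        (PySem.Dict.mk L, ([] : List Char))
     st.2.foldl (fun d r => d.erase r) st.1)
      = PySem.Dict.mk (L.filterMap (stepP nxt)) := by
  have hin := inner_loop nxt L [] [] (by simpa using h)
  apply PySem.Dict.ext
  rw [erase_loop]
  have h1 := hin.1
  have h2 := hin.2
  simp only [List.nil_append] at h1 h2
  rw [h1, h2]
  simpa using filter_map_fail nxt L h

theorem main_inv : ∀ (rows : List (PySem.Dict Char Int)) (L : List (Char × Int)),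
    (L.map Prod.fst).Nodup →
    (rows.foldl rowFun (PySem.Dict.mk L)).items
      = rows.foldl (fun L nxt => L.filterMap (stepP nxt)) L := by
  intro rows
  induction rows with
  | nil => intro L _; rfl
  | cons nxt rows ih =>
    intro L h
    have h' : rowFun (PySem.Dict.mk L) nxt = PySem.Dict.mk (L.filterMap (stepP nxt)) :=
      row_step nxt L h
    rw [List.foldl_cons, List.foldl_cons, h']
    exact ih _ ((keys_filterMap_step nxt L).nodup h)

theorem goKey_cond (cr : PySem.Dict Char Int) (k : Char) (val : Int)
    (rows : List (PySem.Dict Char Int)) :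
    goKey k val (cr :: rows)
      = if cr.contains k && decide (val - cr.getD k 0 ≥ 0) then
          goKey k (val - cr.getD k 0) rows
        else none := rfl

theorem fold_eq_goKey : ∀ (rows : List (PySem.Dict Char Int)) (L : List (Char × Int)),
    rows.foldl (fun L nxt => L.filterMap (stepP nxt)) L
      = L.filterMap (fun p => (goKey p.1 p.2 rows).map (fun v => (p.1, v))) := by
  intro rows
  induction rows with
  | nil =>
    intro L
    rw [List.foldl_nil]
    have : ∀ p ∈ L, (Option.map (fun v => (p.1, v)) (goKey p.1 p.2 [])) = some p := by
      intro p _; rfl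
    rw [List.filterMap_congr this]
    simp
  | cons nxt rows ih =>
    intro L
    rw [List.foldl_cons, ih, List.filterMap_filterMap]
    apply List.filterMap_congr
    intro p _
    rw [stepP, goKey_cond]
    by_cases hc : (nxt.contains p.1 && decide (p.2 - nxt.getD p.1 0 ≥ 0)) = true
    · rw [if_pos hc, if_pos hc]
      rfl
    · rw [if_neg hc, if_neg hc]
      rfl

-- B-side characterisations

theorem mem_common_fold (rows : List String) : ∀ (s0 : PySem.Set Char) (k : Char),
    (k ∈ rows.foldl (fun s row => PySem.Set.inter s (PySem.Set.ofList row.toList)) s0)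
      ↔ k ∈ s0 ∧ ∀ row ∈ rows, k ∈ row.toList := by
  induction rows with
  | nil => intro s0 k; simp
  | cons r rows ih =>
    intro s0 k
    rw [List.foldl_cons, ih]
    simp only [PySem.Set.mem_inter, PySem.Set.mem_ofList, List.mem_cons]
    constructor
    · rintro ⟨⟨h1, h2⟩, h3⟩
      exact ⟨h1, by rintro row (rfl | hr); exact h2; exact h3 row hr⟩
    · rintro ⟨h1, h2⟩
      exact ⟨⟨h1, h2 r (Or.inl rfl)⟩, fun row hr => h2 row (Or.inr hr)⟩

theorem rest_fold_getD (rows : List String) : ∀ (d : PySem.Dict Char Int) (k : Char),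
    (rows.foldl (fun d row => row.toList.foldl (fun d c => d.modify c 0 (· + 1)) d) d).getD k 0
      = d.getD k 0 + (rows.map (fun row => (row.toList.count k : Int))).sum := by
  induction rows with
  | nil => intro d k; simp
  | cons r rows ih =>
    intro d k
    rw [List.foldl_cons, ih, PySem.Dict.getD_foldl_modify_add_one]
    simp only [List.map_cons, List.sum_cons]
    ring

theorem goKey_closed (k : Char) : ∀ (rows : List (PySem.Dict Char Int)) (val : Int),
    0 ≤ val →
    (∀ cr ∈ rows, 0 ≤ cr.getD k 0) →
    goKey k val rows
      = if (rows.all (fun cr => cr.contains k)) = true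
            ∧ 0 ≤ val - (rows.map (fun cr => cr.getD k 0)).sum then
          some (val - (rows.map (fun cr => cr.getD k 0)).sum)
        else none := by
  intro rows
  induction rows with
  | nil => intro val hval _; simp [goKey, hval]
  | cons cr rows ih =>
    intro val hval hpos
    have hposr : ∀ c ∈ rows, 0 ≤ PySem.Dict.getD c k 0 := fun c hc => hpos c (List.mem_cons_of_mem _ hc)
    have hsum : 0 ≤ (rows.map (fun cr => cr.getD k 0)).sum :=
      List.sum_nonneg (by rintro x hx; obtain ⟨c, hc, rfl⟩ := List.mem_map.mp hx; exact hposr c hc)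
    rw [goKey_cond]
    by_cases hc1 : cr.contains k = true
    · by_cases hc2 : 0 ≤ val - cr.getD k 0
      · have hb : (cr.contains k && decide (val - cr.getD k 0 ≥ 0)) = true := by
          simp only [hc1, Bool.true_and, decide_eq_true_eq, ge_iff_le]; omega
        rw [if_pos hb, ih _ hc2 hposr]
        simp only [List.all_cons, List.map_cons, List.sum_cons, hc1, Bool.true_and]
        by_cases h3 : (rows.all (fun cr => cr.contains k)) = true ∧ 0 ≤ val - cr.getD k 0 - (rows.map (fun cr => cr.getD k 0)).sum
        · rw [if_pos h3, if_pos ⟨h3.1, by linarith [h3.2]⟩]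
          congr 1; ring
        · rw [if_neg h3, if_neg (by rintro ⟨ha, hb'⟩; exact h3 ⟨ha, by linarith [hb']⟩)]
      · have hb : (cr.contains k && decide (val - cr.getD k 0 ≥ 0)) = false := by
          simp only [ge_iff_le, Bool.and_eq_false_iff, decide_eq_false_iff_not, not_le]
          right; omega
        rw [if_neg (by rw [hb]; simp), if_neg]
        rintro ⟨-, hge⟩
        simp only [List.map_cons, List.sum_cons] at hge
        omega
    · have hb : (cr.contains k && decide (val - cr.getD k 0 ≥ 0)) = false := by
        simp [hc1]
      rw [if_neg (by rw [hb]; simp), if_neg]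
      rintro ⟨hall, -⟩
      simp only [List.all_cons, Bool.and_eq_true] at hall
      exact hc1 hall.1

theorem sum_filterMap_getD (g : Char → Option Int) : ∀ (l : List Char),
    (l.filterMap g).sum = (l.map (fun x => (g x).getD 0)).sum := by
  intro l
  induction l with
  | nil => rfl
  | cons x l ih =>
    cases hg : g x with
    | none => rw [List.filterMap_cons_none hg, List.map_cons, List.sum_cons, hg]; simpa using ih
    | some v => rw [List.filterMap_cons_some hg, List.map_cons, List.sum_cons, List.sum_cons, hg, ih]; rfl

theorem perkey_eq (rows1 : List String) (cs0 : List Char) (n : Int) (hn : 0 ≤ n) (k : Char)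
    (hk : k ∈ cs0) :
    (goKey k ((cs0.count k : Int) * n) (rows1.map (fun row => PySem.Dict.counter row.toList))).getD 0
      = if PySem.Set.contains
            (rows1.foldl (fun s row => PySem.Set.inter s (PySem.Set.ofList row.toList))
              (PySem.Set.ofList cs0)) k
          && decide ((PySem.Dict.counter cs0).getD k 0 * n
              - (rows1.foldl (fun d row => row.toList.foldl (fun d c => d.modify c 0 (· + 1)) d)
                  (PySem.Dict.empty : PySem.Dict Char Int)).getD k 0 ≥ 0) then
          (PySem.Dict.counter cs0).getD k 0 * n
            - (rows1.foldl (fun d row => row.toList.foldl (fun d c => d.modify c 0 (· + 1)) d)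
                (PySem.Dict.empty : PySem.Dict Char Int)).getD k 0
        else 0 := by
  have hval : (0:Int) ≤ (cs0.count k : Int) * n := mul_nonneg (Int.natCast_nonneg _) hn
  have hpos : ∀ cr ∈ rows1.map (fun row => PySem.Dict.counter row.toList),
      (0:Int) ≤ PySem.Dict.getD cr k 0 := by
    intro cr hcr
    obtain ⟨row, hrow, rfl⟩ := List.mem_map.mp hcr
    rw [PySem.Dict.getD_counter]
    exact Int.natCast_nonneg _
  rw [goKey_closed k _ _ hval hpos]
  have hrest : (rows1.foldl (fun d row => row.toList.foldl (fun d c => d.modify c 0 (· + 1)) d)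
      (PySem.Dict.empty : PySem.Dict Char Int)).getD k 0
      = ((rows1.map (fun row => PySem.Dict.counter row.toList)).map (fun cr => cr.getD k 0)).sum := by
    rw [rest_fold_getD, PySem.Dict.getD_empty, List.map_map]
    simp [Function.comp_def, PySem.Dict.getD_counter]
  have hall : (((rows1.map (fun row => PySem.Dict.counter row.toList)).all
        (fun cr => cr.contains k)) = true)
      ↔ ∀ row ∈ rows1, k ∈ row.toList := by
    simp [List.all_map, Function.comp_def, PySem.Dict.contains_counter, List.all_eq_true]
  have hcom : (PySem.Set.contains
      (rows1.foldl (fun s row => PySem.Set.inter s (PySem.Set.ofList row.toList))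
        (PySem.Set.ofList cs0)) k = true)
      ↔ ∀ row ∈ rows1, k ∈ row.toList := by
    rw [PySem.Set.contains_iff, mem_common_fold]
    simp [PySem.Set.mem_ofList, hk]
  rw [hrest, PySem.Dict.getD_counter]
  by_cases hA : ∀ row ∈ rows1, k ∈ row.toList
  · have hcomT := hcom.mpr hA
    by_cases hB : (0:Int) ≤ (cs0.count k : Int) * n
        - ((rows1.map (fun row => PySem.Dict.counter row.toList)).map (fun cr => cr.getD k 0)).sum
    · rw [if_pos ⟨hall.mpr hA, hB⟩, hcomT]
      have hd : decide ((cs0.count k : Int) * n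
          - ((rows1.map (fun row => PySem.Dict.counter row.toList)).map (fun cr => cr.getD k 0)).sum ≥ 0) = true := by
        simpa using hB
      rw [hd]
      rfl
    · rw [if_neg (by rintro ⟨-, h⟩; exact hB h), hcomT]
      have hd : decide ((cs0.count k : Int) * n
          - ((rows1.map (fun row => PySem.Dict.counter row.toList)).map (fun cr => cr.getD k 0)).sum ≥ 0) = false := by
        simpa using hB
      rw [hd]
      rfl
  · rw [if_neg (by rintro ⟨h1, -⟩; exact hA (hall.mp h1))]
    have hcomF : PySem.Set.contains
        (rows1.foldl (fun s row => PySem.Set.inter s (PySem.Set.ofList row.toList))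
          (PySem.Set.ofList cs0)) k = false := by
      cases h : PySem.Set.contains
          (rows1.foldl (fun s row => PySem.Set.inter s (PySem.Set.ofList row.toList))
            (PySem.Set.ofList cs0)) k
      · rfl
      · exact absurd (hcom.mp h) hA
    rw [hcomF]
    rfl

theorem ports_agree (gems : List String) :
    find_unique_stone gems = find_unique_stone_alt gems := by
  rw [find_unique_stone, find_unique_stone_alt]
  by_cases hl : gems.length = 1
  · have h1 : (gems.length == 1) = true := by simp [hl]
    have h2 : ((PySem.List.len gems : Int) == 1) = true := by simp [PySem.List.len, hl]
    rw [h1, h2, if_pos rfl, if_pos rfl]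
  · have h1 : (gems.length == 1) = false := by simp [hl]
    have h2 : ((PySem.List.len gems : Int) == 1) = false := by
      simp only [PySem.List.len, beq_eq_false_iff_ne, ne_eq]
      exact_mod_cast hl
    rw [h1, h2, if_neg Bool.false_ne_true, if_neg Bool.false_ne_true]
    show (((PySem.List.pyRange 1 (PySem.List.len gems) 1).foldl
        (fun current row => rowFun current (PySem.Dict.counter (PySem.List.pyGetD gems row "").toList))
        (((PySem.Dict.counter (PySem.List.pyGetD gems 0 "").toList).items).foldl
          (fun d p => d.modify p.1 0 (· * PySem.List.len gems))
          (PySem.Dict.counter (PySem.List.pyGetD gems 0 "").toList))).values).sum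
      = (PySem.Dict.counter (PySem.List.pyGetD gems 0 "").toList).keys.foldl
          (fun total k =>
            if PySem.Set.contains
                ((PySem.List.slice gems (some 1)).foldl
                  (fun s row => PySem.Set.inter s (PySem.Set.ofList row.toList))
                  (PySem.Set.ofList (PySem.List.pyGetD gems 0 "").toList)) k
              && decide ((PySem.Dict.counter (PySem.List.pyGetD gems 0 "").toList).getD k 0 * PySem.List.len gems
                  - ((PySem.List.slice gems (some 1)).foldl
                      (fun d row => row.toList.foldl (fun d c => d.modify c 0 (· + 1)) d)
                      (PySem.Dict.empty : PySem.Dict Char Int)).getD k 0 ≥ 0) then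
              total + ((PySem.Dict.counter (PySem.List.pyGetD gems 0 "").toList).getD k 0 * PySem.List.len gems
                  - ((PySem.List.slice gems (some 1)).foldl
                      (fun d row => row.toList.foldl (fun d c => d.modify c 0 (· + 1)) d)
                      (PySem.Dict.empty : PySem.Dict Char Int)).getD k 0)
            else total) 0
    have hslice : PySem.List.slice gems (some 1) = gems.drop 1 := by simp [pysem]
    rw [hslice]
    set cs0 := (PySem.List.pyGetD gems 0 "").toList with hcs0
    set rows := (gems.drop 1).map (fun row => PySem.Dict.counter row.toList) with hrows
    set L0 := (PySem.Dict.counter cs0).items with hL0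
    have hnd : (L0.map Prod.fst).Nodup := PySem.Dict.nodup_keys_counter cs0
    have hscale : (L0.foldl
        (fun d p => d.modify p.1 0 (· * PySem.List.len gems)) (PySem.Dict.counter cs0))
        = PySem.Dict.mk (L0.map (fun p => (p.1, p.2 * PySem.List.len gems))) := by
      apply PySem.Dict.ext
      have := scale_loop (PySem.List.len gems) L0 [] (by simpa using hnd)
      simpa using this
    rw [hscale]
    have key : (PySem.List.pyRange 1 (PySem.List.len gems) 1).foldl
        (fun current row => rowFun current (PySem.Dict.counter (PySem.List.pyGetD gems row "").toList))
        (PySem.Dict.mk (L0.map (fun p => (p.1, p.2 * PySem.List.len gems))))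
        = rows.foldl rowFun (PySem.Dict.mk (L0.map (fun p => (p.1, p.2 * PySem.List.len gems)))) := by
      have e1 := PySem.List.foldl_pyRange_pyGetD gems ""
        (fun acc s => rowFun acc (PySem.Dict.counter s.toList))
        (PySem.Dict.mk (L0.map (fun p => (p.1, p.2 * PySem.List.len gems)))) (a := 1) (by norm_num)
      have e2 : rows.foldl rowFun (PySem.Dict.mk (L0.map (fun p => (p.1, p.2 * PySem.List.len gems))))
          = (gems.drop 1).foldl (fun acc s => rowFun acc (PySem.Dict.counter s.toList))
            (PySem.Dict.mk (L0.map (fun p => (p.1, p.2 * PySem.List.len gems)))) := by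
        rw [hrows]
        exact List.foldl_map
      exact e1.trans e2.symm
    rw [key]
    have hitems := main_inv rows (L0.map (fun p => (p.1, p.2 * PySem.List.len gems)))
      (by simpa [List.map_map, Function.comp_def] using hnd)
    rw [PySem.Dict.values, hitems, fold_eq_goKey, List.map_filterMap]
    rw [List.filterMap_congr (g := fun p => goKey p.1 p.2 rows)
      (by intro p _; simp [Option.map_map, Function.comp_def])]
    rw [List.filterMap_map, hL0, PySem.Dict.items_counter, List.filterMap_map]
    have hsum := sum_filterMap_getD
      (fun k => goKey k ((cs0.count k : Int) * PySem.List.len gems) rows) (PySem.Set.ofList cs0)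
    rw [show ((PySem.Set.ofList cs0).filterMap
        (((fun p => goKey p.1 p.2 rows) ∘ (fun p => (p.1, p.2 * PySem.List.len gems))) ∘ (fun k => (k, (List.count k cs0 : Int)))))
      = (PySem.Set.ofList cs0).filterMap
        (fun k => goKey k ((cs0.count k : Int) * PySem.List.len gems) rows) from rfl, hsum]
    rw [PySem.Dict.keys_counter]
    rw [PySem.List.foldl_congr_mem' _ _
      (fun total k =>
        total + (if PySem.Set.contains
              ((gems.drop 1).foldl (fun s row => PySem.Set.inter s (PySem.Set.ofList row.toList))
                (PySem.Set.ofList cs0)) k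
            && decide ((PySem.Dict.counter cs0).getD k 0 * PySem.List.len gems
                - ((gems.drop 1).foldl (fun d row => row.toList.foldl (fun d c => d.modify c 0 (· + 1)) d)
                    (PySem.Dict.empty : PySem.Dict Char Int)).getD k 0 ≥ 0) then
            (PySem.Dict.counter cs0).getD k 0 * PySem.List.len gems
              - ((gems.drop 1).foldl (fun d row => row.toList.foldl (fun d c => d.modify c 0 (· + 1)) d)
                  (PySem.Dict.empty : PySem.Dict Char Int)).getD k 0
          else 0)) 0
      (by intro k _ total
          beta_reduce
          split
          next => rfl
          next => exact (add_zero total).symm)]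
    rw [PySem.List.foldl_add, zero_add]
    apply congrArg List.sum
    apply List.map_congr_left
    intro k hk
    exact perkey_eq (gems.drop 1) cs0 (PySem.List.len gems) (Int.natCast_nonneg _) k
      (by simpa [PySem.Set.mem_ofList] using hk)

-- ===== VERDICT (by name: the statement is the Claim_ definition above) =====
theorem find_unique_stone_spec : Claim_equal_find_unique_stone := by
  intro gems _ _
  unfold Spec_find_unique_stone
  exact ports_agree gems
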